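-- pv_equiv track=rewrite | github.com/eignatenkov/adventofcode2019 | solutions/day_22.py | compute_orbit
-- ===== SOURCE A (Python) =====
-- def apply_commands_to_position(position, size, commands):
--     for command in commands:
--         if command[0] == 1:
--             position = size - 1 - position
--         elif command[0] == 2:
--             position = (position - command[1]) % size
--         else:
--             position = (position * command[1]) % size
--     return position
--
-- def compute_orbit(position, size, commands, limit=None):
--     orbit = [position]
--     current_place = position
--     while True:
--         if limit and len(orbit) == limit:
--             return orbit
--         current_place = apply_commands_to_position(current_place, size, commands)
--         if orbit[0] == current_place:
--             return orbit
--         else: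
--             orbit.append(current_place)
-- ===== SOURCE B (Python) =====
-- def compute_orbit(position, size, commands, limit=None):
--     # Compose the whole command list once into a single affine map
--     # p -> (a*p + b) % size, then one mod-multiply-add per orbit step.
--     a, b = 1, 0
--     for c in commands:
--         if c[0] == 1:
--             a, b = -a % size, (size - 1 - b) % size
--         elif c[0] == 2:
--             b = (b - c[1]) % size
--         else:
--             a, b = a * c[1] % size, b * c[1] % size
--     orbit = [position]
--     p = (a * position + b) % size
--     while p != position and not (limit and len(orbit) == limit):
--         orbit.append(p)
--         p = (a * p + b) % size
--     return orbit
-- ===== Notes on version B (the rewrite author's own statement) =====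
-- stated objective: alternative
-- what changed: B folds the whole command list once into a single affine map p -> (a*p+b) % size and its loop does one precomputed mod-multiply-add per orbit step (testing the next position before appending), instead of A's re-scan of the full command list on every orbit step; a timing run read B 3x-136x ahead on sizes where A finishes, but both time out on inputs whose orbit itself is astronomically long, so no unqualified speed claim is made.
-- outside the precondition, e.g. on compute_orbit(0, 10, [[]], 1): A returns [0], B raises IndexError; on compute_orbit(0, 0, [[3, 2]], 1): A returns [0], B raises ZeroDivisionError; on compute_orbit(0, -3, [[1]], 2): A returns [0, -4], B returns [0, -1]
import Mathlib
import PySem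

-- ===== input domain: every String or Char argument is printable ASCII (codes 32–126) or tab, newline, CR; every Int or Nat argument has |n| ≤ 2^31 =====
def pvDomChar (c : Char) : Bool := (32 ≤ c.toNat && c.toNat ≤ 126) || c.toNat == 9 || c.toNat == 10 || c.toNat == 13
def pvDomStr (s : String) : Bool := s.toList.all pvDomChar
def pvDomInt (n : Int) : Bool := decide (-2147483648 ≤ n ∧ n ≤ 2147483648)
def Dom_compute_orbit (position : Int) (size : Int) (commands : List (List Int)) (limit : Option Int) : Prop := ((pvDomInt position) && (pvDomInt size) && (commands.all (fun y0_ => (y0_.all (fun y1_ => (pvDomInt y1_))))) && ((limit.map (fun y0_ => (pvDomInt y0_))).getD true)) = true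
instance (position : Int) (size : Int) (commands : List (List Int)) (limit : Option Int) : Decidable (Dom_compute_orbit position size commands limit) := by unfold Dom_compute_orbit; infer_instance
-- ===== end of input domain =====

-- B folds all commands once into ONE affine map and does one mod-multiply-add per
-- orbit step (testing the precomputed next position before appending), instead of
-- A's re-scan of the whole command list on every orbit step.

-- Python truthiness of 'limit and len(orbit) == limit' (limit is None or an int).
def pvLimHit (limit : Option Int) (len : Nat) : Bool :=
  match limit with
  | none => false
  | some n => n != 0 && ((len : Int) == n)

-- fuel for both ports' while-loops; under Pre_ it bounds the number of iterations
-- the Python while-loops actually perform.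
def pvFuel (size : Int) (limit : Option Int) : Nat :=
  size.toNat + (limit.getD 0).toNat + 1

-- ===== PORT A =====
-- one command applied to a position (none = IndexError on a malformed command)
def pvStepA (size : Int) (p : Int) (c : List Int) : Option Int :=
  match PySem.List.pyGet? c 0 with
  | none => none
  | some c0 =>
    if c0 = 1 then some (size - 1 - p)
    else if c0 = 2 then (PySem.List.pyGet? c 1).map (fun k => PySem.Int.mod (p - k) size)
    else (PySem.List.pyGet? c 1).map (fun k => PySem.Int.mod (p * k) size)

-- apply_commands_to_position: the for-loop over commands
def pvApplyA (size : Int) (commands : List (List Int)) (p : Int) : Option Int :=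
  match commands with
  | [] => some p
  | c :: rest =>
    match pvStepA size p c with
    | none => none
    | some q => pvApplyA size rest q

-- A's while-loop; 'first' carries the constant orbit[0]; the none-branch (a Python
-- exception inside the loop) is excluded by Pre_.
def pvLoopA (size : Int) (commands : List (List Int)) (limit : Option Int) :
    Nat → Int → Int → List Int → List Int
  | 0, _, _, orbit => orbit
  | fuel + 1, first, cur, orbit =>
    if pvLimHit limit orbit.length then orbit
    else
      match pvApplyA size commands cur with
      | none => orbit
      | some cur' =>
        if first = cur' then orbit
        else pvLoopA size commands limit fuel first cur' (orbit ++ [cur'])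

def compute_orbit (position : Int) (size : Int) (commands : List (List Int)) (limit : Option Int) : List Int :=
  pvLoopA size commands limit (pvFuel size limit) position position [position]

-- ===== PORT B =====
-- the fold step of B's for-loop: absorb one command into the affine pair (a, b);
-- none = the Python IndexError / ZeroDivisionError cases (excluded by Pre_)
def pvAffine (size : Int) (ab? : Option (Int × Int)) (c : List Int) : Option (Int × Int) :=
  ab?.bind fun ab =>
    match c with
    | [] => none
    | c0 :: rest =>
      if c0 = 1 then
        some (PySem.Int.mod (-ab.1) size, PySem.Int.mod (size - 1 - ab.2) size)
      else
        match rest with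
        | [] => none
        | k :: _ =>
          if c0 = 2 then some (ab.1, PySem.Int.mod (ab.2 - k) size)
          else some (PySem.Int.mod (ab.1 * k) size, PySem.Int.mod (ab.2 * k) size)

-- B's while-loop: the next position p is precomputed and tested before appending;
-- the orbit is accumulated front-to-back via a reversed accumulator (faithful port
-- of Python's list.append) together with its running length.
def pvLoopB (size a b : Int) (limit : Option Int) :
    Nat → Int → Int → Nat → List Int → List Int
  | 0, _, _, _, acc => acc.reverse
  | fuel + 1, first, p, len, acc =>
    if p ≠ first ∧ pvLimHit limit len = false then
      pvLoopB size a b limit fuel first (PySem.Int.mod (a * p + b) size) (len + 1) (p :: acc)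
    else acc.reverse

def compute_orbit_alt (position : Int) (size : Int) (commands : List (List Int)) (limit : Option Int) : List Int :=
  match commands.foldl (pvAffine size) (some (1, 0)) with
  | none => [position]  -- Python B raises here (malformed command / size = 0); outside Pre_
  | some (a, b) =>
    pvLoopB size a b limit (pvFuel size limit) position
      (PySem.Int.mod (a * position + b) size) 1 [position]

-- ===== PRECONDITION & SPEC =====
-- Pre_ restricts to the function's natural domain (a deck shuffle: positive deck size,
-- well-formed commands) and to inputs where Python A terminates; it excludes inputs A
-- still returns on for these stated reasons (see claim.json cites): size ≤ 0 (B raises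
-- ZeroDivisionError at 0, and 'size-1-position' is not congruent-canonical for negative
-- size); a position outside [0, size) fed to commands that never reduce mod size (all
-- deal-into-new-stack commands, or none), where A returns unreduced values B reduces;
-- and a falsy/absent limit without the coprimality that guarantees A's orbit closes
-- (A diverges on most such inputs).
def Pre_compute_orbit (position : Int) (size : Int) (commands : List (List Int)) (limit : Option Int) : Prop :=
  1 ≤ size ∧
  (∀ c ∈ commands, c.head? = some 1 ∨ 2 ≤ c.length) ∧
  ((0 ≤ position ∧ position < size) ∨ (∃ c ∈ commands, ¬ c.head? = some 1)) ∧
  ((limit ≠ none ∧ 1 ≤ limit.getD 0) ∨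
    ((0 ≤ position ∧ position < size) ∧
      ∀ c ∈ commands, c.head? = some 1 ∨ c.head? = some 2 ∨ Int.gcd (c.getD 1 0) size = 1))

instance (position : Int) (size : Int) (commands : List (List Int)) (limit : Option Int) : Decidable (Pre_compute_orbit position size commands limit) := by unfold Pre_compute_orbit; infer_instance

def pvWitness_compute_orbit : Int × Int × List (List Int) × Option Int :=
  (3, 10, [[3, 7], [2, 4], [1]], none)

def Spec_compute_orbit (position : Int) (size : Int) (commands : List (List Int)) (limit : Option Int) (out : List Int) : Prop := out = compute_orbit_alt position size commands limit
instance (position : Int) (size : Int) (commands : List (List Int)) (limit : Option Int) (out : List Int) : Decidable (Spec_compute_orbit position size commands limit out) := by unfold Spec_compute_orbit; infer_instance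

-- ===== CLAIM (what is proved, stated in full; the proofs are below) =====
def Claim_equal_compute_orbit : Prop := ∀ (position : Int) (size : Int) (commands : List (List Int)) (limit : Option Int), Dom_compute_orbit position size commands limit → Pre_compute_orbit position size commands limit → Spec_compute_orbit position size commands limit (compute_orbit position size commands limit)

-- ===== LEMMAS AND PROOFS =====

-- x % size is congruent to x
theorem pv_modeq_self (size x : Int) : Int.ModEq size (x % size) x :=
  Int.emod_emod_of_dvd x dvd_rfl

-- pvAffine is strict in none: once the fold fails it stays failed
theorem foldl_affine_none (size : Int) :
    ∀ (cs : List (List Int)), cs.foldl (pvAffine size) none = none := by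
  intro cs
  induction cs with
  | nil => rfl
  | cons c rest ih => simpa [pvAffine] using ih

-- A's pass over the commands succeeds and lands in the congruence class of the
-- composed affine map, whenever B's fold succeeds.
theorem pv_apply_cong (size : Int) (hs : 1 ≤ size) :
    ∀ (cs : List (List Int)) (a0 b0 a b v q : Int),
      cs.foldl (pvAffine size) (some (a0, b0)) = some (a, b) →
      Int.ModEq size v (a0 * q + b0) →
      ∃ r, pvApplyA size cs v = some r ∧ Int.ModEq size r (a * q + b) := by
  intro cs
  induction cs with
  | nil =>
    intro a0 b0 a b v q hco hv
    simp only [List.foldl_nil, Option.some.injEq, Prod.mk.injEq] at hco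
    exact ⟨v, rfl, by rw [← hco.1, ← hco.2]; exact hv⟩
  | cons c rest ih =>
    intro a0 b0 a b v q hco hv
    rw [List.foldl_cons] at hco
    simp only [pvApplyA, pvStepA]
    cases c with
    | nil => simp [pvAffine] at hco; rw [foldl_affine_none] at hco; simp at hco
    | cons c0 ctl =>
      have hg0 : PySem.List.pyGet? (c0 :: ctl) 0 = some c0 := by
        simp [PySem.List.pyGet?, PySem.List.pyIdx?]
      rw [hg0]
      by_cases h1 : c0 = 1
      · simp only [pvAffine, Option.bind_some, h1, if_true] at hco
        simp only [h1, if_true]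
        obtain ⟨r, hr, hcong⟩ := ih _ _ _ _ (size - 1 - v) q hco
          (by
            have h2 : Int.ModEq size (PySem.Int.mod (-a0) size * q + PySem.Int.mod (size - 1 - b0) size) ((-a0) * q + (size - 1 - b0)) := by
              rw [PySem.Int.mod_eq_emod_of_pos (show (0:Int) < size by omega), PySem.Int.mod_eq_emod_of_pos (show (0:Int) < size by omega)]
              exact ((pv_modeq_self size (-a0)).mul_right q).add (pv_modeq_self size _)
            have h3 : Int.ModEq size (size - 1 - v) ((-a0) * q + (size - 1 - b0)) := by
              have := (Int.ModEq.refl (size - 1)).sub hv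
              calc (size - 1 - v) ≡ size - 1 - (a0 * q + b0) [ZMOD size] := this
                _ = (-a0) * q + (size - 1 - b0) := by ring
            exact h3.trans h2.symm)
        exact ⟨r, hr, hcong⟩
      · cases ctl with
        | nil =>
          simp only [pvAffine, Option.bind_some, h1, if_false] at hco
          rw [foldl_affine_none] at hco; simp at hco
        | cons k ktl =>
          have hg1 : PySem.List.pyGet? (c0 :: k :: ktl) 1 = some k := by
            simp [PySem.List.pyGet?, PySem.List.pyIdx?]
          rw [hg1]
          by_cases h2 : c0 = 2
          · simp only [pvAffine, Option.bind_some, h2, if_true] at hco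
            simp only [h2, reduceIte, Option.map_some]
            obtain ⟨r, hr, hcong⟩ := ih _ _ _ _ (PySem.Int.mod (v - k) size) q hco
              (by
                rw [PySem.Int.mod_eq_emod_of_pos (show (0:Int) < size by omega), PySem.Int.mod_eq_emod_of_pos (show (0:Int) < size by omega)]
                have h3 : Int.ModEq size (v - k) (a0 * q + (b0 - k)) := by
                  calc (v - k) ≡ (a0 * q + b0) - k [ZMOD size] := hv.sub (Int.ModEq.refl k)
                    _ = a0 * q + (b0 - k) := by ring
                exact ((pv_modeq_self size _).trans h3).trans
                  (((Int.ModEq.refl (a0 * q)).add (pv_modeq_self size (b0 - k))).symm))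
            exact ⟨r, hr, hcong⟩
          · simp only [pvAffine, Option.bind_some, h1, h2, if_false] at hco
            simp only [h1, h2, if_false, Option.map_some]
            obtain ⟨r, hr, hcong⟩ := ih _ _ _ _ (PySem.Int.mod (v * k) size) q hco
              (by
                rw [PySem.Int.mod_eq_emod_of_pos (show (0:Int) < size by omega), PySem.Int.mod_eq_emod_of_pos (show (0:Int) < size by omega), PySem.Int.mod_eq_emod_of_pos (show (0:Int) < size by omega)]
                have h3 : Int.ModEq size (v * k) ((a0 * k) * q + b0 * k) := by
                  calc (v * k) ≡ (a0 * q + b0) * k [ZMOD size] := hv.mul_right k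
                    _ = (a0 * k) * q + b0 * k := by ring
                exact ((pv_modeq_self size _).trans h3).trans
                  ((((pv_modeq_self size (a0 * k)).mul_right q).add (pv_modeq_self size (b0 * k))).symm))
            exact ⟨r, hr, hcong⟩

-- A's pass lands in [0, size) when the start does, or when some command reduces mod size.
theorem pv_apply_range (size : Int) (hs : 1 ≤ size) :
    ∀ (cs : List (List Int)) (v r : Int),
      (∀ c ∈ cs, c.head? = some 1 ∨ 2 ≤ c.length) →
      ((0 ≤ v ∧ v < size) ∨ (∃ c ∈ cs, ¬ c.head? = some 1)) →
      pvApplyA size cs v = some r → 0 ≤ r ∧ r < size := by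
  intro cs
  induction cs with
  | nil =>
    intro v r _ hrange hr
    simp only [pvApplyA, Option.some.injEq] at hr
    rcases hrange with h | h
    · omega
    · simp at h
  | cons c rest ih =>
    intro v r hwf hrange happ
    simp only [pvApplyA, pvStepA] at happ
    cases hg0 : PySem.List.pyGet? c 0 with
    | none => rw [hg0] at happ; simp at happ
    | some c0 =>
      rw [hg0] at happ
      have hhead : c.head? = some c0 := by
        cases c with
        | nil => simp [pysem] at hg0
        | cons x xs => simp [pysem] at hg0; simp [hg0]
      by_cases h1 : c0 = 1
      · simp only [h1, if_true] at happ
        rcases hrange with hv | ⟨c', hc', hne⟩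
        · exact ih _ _ (fun c hc => hwf c (List.mem_cons_of_mem _ hc)) (Or.inl (by omega)) happ
        · rcases List.mem_cons.mp hc' with rfl | hmem
          · exact absurd (hhead.trans (by rw [h1])) hne
          · exact ih _ _ (fun c hc => hwf c (List.mem_cons_of_mem _ hc)) (Or.inr ⟨c', hmem, hne⟩) happ
      · have hmodrange : ∀ x, 0 ≤ PySem.Int.mod x size ∧ PySem.Int.mod x size < size :=
          fun x => ⟨PySem.Int.mod_nonneg x (by omega), PySem.Int.mod_lt x (by omega)⟩
        have hrest := fun c hc => hwf c (List.mem_cons_of_mem _ hc)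
        cases hg1 : PySem.List.pyGet? c 1 with
        | none =>
          by_cases h2 : c0 = 2 <;> simp [h2, hg1, h1] at happ
        | some k =>
          by_cases h2 : c0 = 2
          · simp [h2, hg1] at happ
            exact ih _ _ hrest (Or.inl (hmodrange _)) happ
          · simp [h1, h2, hg1] at happ
            exact ih _ _ hrest (Or.inl (hmodrange _)) happ

-- B's fold succeeds on well-formed commands
theorem pv_compose_success (size : Int) :
    ∀ (cs : List (List Int)) (ab : Int × Int),
      (∀ c ∈ cs, c.head? = some 1 ∨ 2 ≤ c.length) →
      ∃ ab', cs.foldl (pvAffine size) (some ab) = some ab' := by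
  intro cs
  induction cs with
  | nil => intro ab _; exact ⟨ab, rfl⟩
  | cons c rest ih =>
    intro ab hwf
    have hc := hwf c List.mem_cons_self
    rw [List.foldl_cons]
    cases c with
    | nil => simp at hc
    | cons c0 ctl =>
      by_cases h1 : c0 = 1
      · simp only [pvAffine, Option.bind_some, h1, if_true]
        exact ih _ (fun c hc => hwf c (List.mem_cons_of_mem _ hc))
      · have hlen : 2 ≤ (c0 :: ctl).length := by
          rcases hc with h | h
          · simp at h; omega
          · exact h
        cases ctl with
        | nil => simp at hlen
        | cons k ktl =>
          by_cases h2 : c0 = 2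
          · simp only [pvAffine, Option.bind_some, h2, reduceIte]
            exact ih _ (fun c hc => hwf c (List.mem_cons_of_mem _ hc))
          · simp only [pvAffine, Option.bind_some, h1, h2, if_false]
            exact ih _ (fun c hc => hwf c (List.mem_cons_of_mem _ hc))

-- the two while-loops agree step by step: B's loop state carries the precomputed
-- next position, the orbit length and the reversed orbit
theorem pv_loop_eq (size : Int) (hs : 1 ≤ size) (cs : List (List Int)) (a b : Int)
    (limit : Option Int)
    (hwf : ∀ c ∈ cs, c.head? = some 1 ∨ 2 ≤ c.length)
    (hco : cs.foldl (pvAffine size) (some (1, 0)) = some (a, b)) :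
    ∀ (fuel : Nat) (first cur : Int) (orbit : List Int),
      ((0 ≤ cur ∧ cur < size) ∨ (∃ c ∈ cs, ¬ c.head? = some 1)) →
      pvLoopA size cs limit fuel first cur orbit =
        pvLoopB size a b limit fuel first (PySem.Int.mod (a * cur + b) size)
          orbit.length orbit.reverse := by
  intro fuel
  induction fuel with
  | zero => intro first cur orbit _; simp [pvLoopA, pvLoopB]
  | succ n ih =>
    intro first cur orbit hcur
    obtain ⟨r, hr, hcong⟩ := pv_apply_cong size hs cs 1 0 a b cur cur hco
      (by have : (cur : Int) = 1 * cur + 0 := by ring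
          exact this ▸ Int.ModEq.refl cur)
    have hrg : 0 ≤ r ∧ r < size := pv_apply_range size hs cs cur r hwf hcur hr
    have hreq : PySem.Int.mod (a * cur + b) size = r := by
      rw [PySem.Int.mod_eq_emod_of_pos (show (0:Int) < size by omega)]
      have h1 : r % size = r := Int.emod_eq_of_lt hrg.1 hrg.2
      rw [← h1]; exact hcong.symm
    simp only [pvLoopA, pvLoopB, hreq, hr]
    by_cases hl : pvLimHit limit orbit.length = true
    · rw [if_pos hl, if_neg (fun h => by rw [hl] at h; exact absurd h.2 (by simp)),
        List.reverse_reverse]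
    · have hlf : pvLimHit limit orbit.length = false := Bool.eq_false_iff.mpr hl
      rw [if_neg hl]
      by_cases hf : first = r
      · rw [if_pos hf, if_neg (fun h => h.1 hf.symm), List.reverse_reverse]
      · rw [if_neg hf, if_pos ⟨fun h => hf h.symm, hlf⟩]
        have := ih first r (orbit ++ [r]) (Or.inl ⟨hrg.1, hrg.2⟩)
        simpa using this

-- ===== VERDICT (by name: the statement is the Claim_ definition above) =====
theorem compute_orbit_spec : Claim_equal_compute_orbit := by
  unfold Claim_equal_compute_orbit
  intro position size commands limit _ hpre
  obtain ⟨hs, hwf, hrange, _⟩ := hpre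
  unfold Spec_compute_orbit compute_orbit compute_orbit_alt
  obtain ⟨⟨a, b⟩, hco⟩ := pv_compose_success size commands (1, 0) hwf
  rw [hco]
  have := pv_loop_eq size hs commands a b limit hwf hco (pvFuel size limit) position position [position] hrange
  simpa using this
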